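-- pv_equiv track=rewrite | github.com/gamblecd/advent-of-code | 2023/day7/answer.py | sort_hand_wild
-- ===== SOURCE A (Python) =====
-- def sort_hand_wild(hand):
--     hand_map = {}
--     wilds = 0
--     for x in hand:
--         if x =='J':
--             wilds += 1
--         elif x in hand_map.keys():
--             hand_map[x] = hand_map[x] + 1
--         else:
--             hand_map[x] = 1
--
--     if len(hand_map) == 0:
--         hand_map['J'] = wilds;
--     elif wilds > 0:
--         hand_map = dict(sorted(hand_map.items(), key=lambda item: item[1], reverse=True))
--         best_key = list(hand_map.keys())[0]
--         hand_map[best_key] += wilds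
--     return hand_map
-- ===== SOURCE B (Python) =====
-- def sort_hand_wild(hand):
--     wilds = hand.count('J')
--     counts = {}
--     for c in hand:
--         if c != 'J':
--             counts[c] = counts.get(c, 0) + 1
--     if not counts:
--         return {'J': wilds}
--     if wilds == 0:
--         return counts
--     # counting (bucket) sort: group keys by their count, emit counts from
--     # len(hand) down to 1; stability = insertion order within each bucket.
--     buckets = {}
--     for k, v in counts.items():
--         buckets[v] = buckets.get(v, []) + [k]
--     pairs = [(k, v) for v in range(len(hand), 0, -1) for k in buckets.get(v, [])]
--     k0, v0 = pairs[0]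
--     return dict([(k0, v0 + wilds)] + pairs[1:])
-- ===== Notes on version B (the rewrite author's own statement) =====
-- stated objective: alternative
-- what changed: B replaces A's comparison sort of the count map (sorted(..., key=count, reverse=True) then bump the first key) by a counting/bucket sort: it groups keys by their count into buckets and emits buckets from len(hand) down to 1, which reproduces the stable descending order without calling sort; wilds are counted with str.count instead of inside the tally loop.
import Mathlib
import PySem

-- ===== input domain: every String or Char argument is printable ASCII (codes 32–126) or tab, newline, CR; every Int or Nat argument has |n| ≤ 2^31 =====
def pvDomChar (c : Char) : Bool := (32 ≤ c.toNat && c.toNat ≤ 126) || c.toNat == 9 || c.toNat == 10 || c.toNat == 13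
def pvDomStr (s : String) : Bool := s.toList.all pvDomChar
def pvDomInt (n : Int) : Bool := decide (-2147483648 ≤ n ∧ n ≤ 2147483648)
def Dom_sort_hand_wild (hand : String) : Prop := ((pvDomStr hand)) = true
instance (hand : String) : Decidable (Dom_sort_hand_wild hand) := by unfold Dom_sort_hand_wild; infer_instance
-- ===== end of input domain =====

-- B replaces A's comparison sort of the count map by a counting/bucket sort (group keys by count, emit counts from len(hand) down to 1); objective: alternative algorithm.

-- ===== PORT A =====
-- 'for x in hand' yields 1-character strings, modelled as String.ofList [c]; the loop state is (hand_map, wilds).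
def sort_hand_wild (hand : String) : List (String × Int) :=
  let st := hand.toList.foldl
    (fun (st : PySem.Dict String Int × Int) (c : Char) =>
      if String.ofList [c] == "J" then (st.1, st.2 + 1)
      else if st.1.contains (String.ofList [c]) then
        (st.1.insert (String.ofList [c]) (st.1.getD (String.ofList [c]) 0 + 1), st.2)
      else (st.1.insert (String.ofList [c]) 1, st.2))
    (PySem.Dict.empty, 0)
  if st.1.items.length = 0 then ((st.1).insert "J" st.2).items
  else if st.2 > 0 then
    let hm2 := PySem.Dict.ofList (PySem.List.sorted st.1.items (fun it => it.2) true)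
    (hm2.modify (hm2.keys.headD "") 0 (· + st.2)).items
  else st.1.items

-- ===== PORT B =====
def sort_hand_wild_alt (hand : String) : List (String × Int) :=
  let wilds : Int := (PySem.Str.count hand "J" : Int)
  let counts := hand.toList.foldl
    (fun (d : PySem.Dict String Int) (c : Char) =>
      if String.ofList [c] != "J" then
        d.insert (String.ofList [c]) (d.getD (String.ofList [c]) 0 + 1)
      else d)
    PySem.Dict.empty
  if counts.items.length = 0 then [("J", wilds)]
  else if wilds = 0 then counts.items
  else
    -- buckets[v] = buckets.get(v, []) + [k]  is  modify v [] (· ++ [k])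
    let buckets := counts.items.foldl
      (fun (b : PySem.Dict Int (List String)) p => b.modify p.2 [] (· ++ [p.1]))
      PySem.Dict.empty
    let pairs := (PySem.List.pyRange (PySem.Str.len hand) 0 (-1)).flatMap
      (fun v => (buckets.getD v []).map (fun k => (k, v)))
    match pairs with
    | [] => []  -- unreachable guard: counts nonempty makes pairs nonempty (pairs[0] in Python)
    | (k0, v0) :: rest => (k0, v0 + wilds) :: rest

-- ===== PRECONDITION & SPEC =====
def Spec_sort_hand_wild (hand : String) (out : List (String × Int)) : Prop := out = sort_hand_wild_alt hand
instance (hand : String) (out : List (String × Int)) : Decidable (Spec_sort_hand_wild hand out) := by unfold Spec_sort_hand_wild; infer_instance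

-- ===== CLAIM (what is proved, stated in full; the proofs are below) =====
def Claim_equal_sort_hand_wild : Prop := ∀ (hand : String), Dom_sort_hand_wild hand → Spec_sort_hand_wild hand (sort_hand_wild hand)

-- ===== LEMMAS AND PROOFS =====

theorem pv_getD_zero (d : PySem.Dict String Int) (x : String) (hc : ¬ d.contains x = true) :
    d.getD x 0 = 0 := by
  have hg : d.get? x = none := by
    rw [Option.eq_none_iff_forall_ne_some]
    intro v hv
    rw [PySem.Dict.contains_eq_isSome_get?, hv] at hc
    simp at hc
  simp [PySem.Dict.getD, hg]

-- A's combined loop builds Counter(non-J cards) and the number of J's.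
theorem pv_loop (l : List Char) (d : PySem.Dict String Int) (w : Int) :
    l.foldl
      (fun (st : PySem.Dict String Int × Int) (c : Char) =>
        if String.ofList [c] == "J" then (st.1, st.2 + 1)
        else if st.1.contains (String.ofList [c]) then
          (st.1.insert (String.ofList [c]) (st.1.getD (String.ofList [c]) 0 + 1), st.2)
        else (st.1.insert (String.ofList [c]) 1, st.2)) (d, w)
    = (((l.map (fun c => String.ofList [c])).filter (fun s => s != "J")).foldl
         (fun d x => d.insert x (d.getD x 0 + 1)) d,
       w + (((l.map (fun c => String.ofList [c])).filter (fun s => s == "J")).length : Int)) := by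
  induction l generalizing d w with
  | nil => simp
  | cons c t ih =>
    simp only [List.foldl_cons, List.map_cons, List.filter_cons]
    by_cases h : String.ofList [c] = "J"
    · simp only [h, beq_self_eq_true, if_true, bne_self_eq_false, Bool.false_eq_true, if_false,
        List.length_cons, ih]
      simp only [Prod.mk.injEq]
      refine ⟨trivial, by push_cast; ring⟩
    · have hb : (String.ofList [c] == "J") = false := by simp [h]
      have hb2 : (String.ofList [c] != "J") = true := by simp [bne, h]
      simp only [hb, hb2, Bool.false_eq_true, if_false, if_true, List.foldl_cons]
      by_cases hc : (d.contains (String.ofList [c])) = true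
      · simp only [hc, if_true, ih]
      · simp only [hc, Bool.false_eq_true, if_false, ih, pv_getD_zero d _ hc]
        norm_num

-- B's tally loop is the same Counter, reached by filtering the J's on the fly.
theorem pv_bloop (l : List Char) :
    l.foldl
      (fun (d : PySem.Dict String Int) (c : Char) =>
        if String.ofList [c] != "J" then
          d.insert (String.ofList [c]) (d.getD (String.ofList [c]) 0 + 1)
        else d)
      PySem.Dict.empty
    = ((l.map (fun c => String.ofList [c])).filter (fun s => s != "J")).foldl
        (fun d x => d.insert x (d.getD x 0 + 1)) PySem.Dict.empty := by
  rw [List.foldl_filter, List.foldl_map]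

theorem pv_g_eq (c : Char) : String.ofList [c] = "J" ↔ c = 'J' := by
  constructor
  · intro h
    have := congrArg String.toList h
    simpa using this
  · intro h; subst h; rfl

-- hand.count('J') for the single-character needle is the plain character count.
theorem pv_g_beq (c : Char) : (String.ofList [c] == "J") = (c == 'J') := by
  by_cases h : c = 'J'
  · subst h; rfl
  · have h2 : ¬ String.ofList [c] = "J" := fun he => h ((pv_g_eq c).mp he)
    simp [h, h2]

theorem pv_count_go (l : List Char) (fuel acc : Nat) (h : l.length ≤ fuel) :
    PySem.Chars.count.go ['J'] fuel l acc = acc + l.count 'J' := by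
  induction fuel generalizing l acc with
  | zero =>
    have hl : l = [] := List.length_eq_zero_iff.mp (Nat.le_zero.mp h)
    subst hl; simp [PySem.Chars.count.go]
  | succ f ih =>
    cases l with
    | nil => simp [PySem.Chars.count.go]
    | cons a t =>
      have ht : t.length ≤ f := by simpa using h
      by_cases ha : a = 'J'
      · subst ha
        have hgo : PySem.Chars.count.go ['J'] (f+1) ('J'::t) acc
            = PySem.Chars.count.go ['J'] f t (acc+1) := by
          simp [PySem.Chars.count.go, List.isPrefixOf]
        rw [hgo, ih t (acc+1) ht, List.count_cons]
        simp; omega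
      · have hba : ('J' == a) = false := by
          simp only [beq_eq_false_iff_ne, ne_eq]
          exact fun h' => ha h'.symm
        have hgo : PySem.Chars.count.go ['J'] (f+1) (a::t) acc
            = PySem.Chars.count.go ['J'] f t acc := by
          simp [PySem.Chars.count.go, List.isPrefixOf, hba]
        rw [hgo, ih t acc ht, List.count_cons]
        simp [ha]

theorem pv_wilds (hand : String) :
    (PySem.Str.count hand "J" : Int)
    = (((hand.toList.map (fun c => String.ofList [c])).filter (fun s => s == "J")).length : Int) := by
  have h1 : PySem.Str.count hand "J" = hand.toList.count 'J' := by
    rw [PySem.Str.count_eq]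
    have hJ : ("J" : String).toList = ['J'] := rfl
    rw [hJ]
    unfold PySem.Chars.count
    rw [if_neg (by simp)]
    rw [pv_count_go _ _ 0 le_rfl]
    omega
  have h2 : ((hand.toList.map (fun c => String.ofList [c])).filter (fun s => s == "J")).length
      = hand.toList.count 'J' := by
    rw [List.filter_map, List.length_map, ← List.countP_eq_length_filter, List.count_eq_countP]
    apply List.countP_congr
    intro c _
    simpa using pv_g_beq c
  rw [h1, h2]

-- getD from B's grouping loop: the bucket of v lists, in order, the keys whose count is v.
theorem pv_bucket_getD (its : List (String × Int)) (v : Int) :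
    (its.foldl (fun (b : PySem.Dict Int (List String)) p => b.modify p.2 [] (· ++ [p.1]))
      PySem.Dict.empty).getD v []
    = (its.filter (fun p => p.2 == v)).map (·.1) := by
  have h := PySem.Dict.getD_foldl_modify_append
    (l := its.map (fun p : String × Int => (p.2, p.1)))
    (d := (PySem.Dict.empty : PySem.Dict Int (List String))) (c := v)
  rw [List.foldl_map] at h
  simpa [List.filter_map, List.map_map, Function.comp_def] using h

theorem pv_insertBy_append {α : Type} (before : α → α → Bool) (x : α) (as bs : List α)
    (h : ∀ a ∈ as, before x a = false) :
    PySem.List.insertBy before x (as ++ bs) = as ++ PySem.List.insertBy before x bs := by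
  induction as with
  | nil => simp
  | cons a t ih =>
    have ha := h a List.mem_cons_self
    rw [List.cons_append]
    show (if before x a = true then x :: (a :: (t ++ bs)) else a :: PySem.List.insertBy before x (t ++ bs))
        = (a :: t) ++ PySem.List.insertBy before x bs
    rw [if_neg (by simp [ha]), ih (fun a ha => h a (List.mem_cons_of_mem _ ha))]
    rfl

theorem pv_insertBy_front {α : Type} (before : α → α → Bool) (x : α) (bs : List α)
    (h : ∀ b ∈ bs, before x b = true) :
    PySem.List.insertBy before x bs = x :: bs := by
  cases bs with
  | nil => rfl
  | cons b t => simp [PySem.List.insertBy, h b (List.mem_cons_self)]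

-- appending one element to the input appends it to its bucket — exactly what stable insertion does
theorem pv_bucket_insert (x : String × Int) (vs : List Int) (xs : List (String × Int))
    (hvs : vs.Pairwise (· > ·)) (hx : x.2 ∈ vs) :
    vs.flatMap (fun v => (xs ++ [x]).filter (fun p => p.2 == v))
    = PySem.List.insertBy (fun a b => decide (b.2 < a.2)) x
        (vs.flatMap (fun v => xs.filter (fun p => p.2 == v))) := by
  induction vs with
  | nil => cases hx
  | cons v vs' ih =>
    have hvrel : ∀ u ∈ vs', v > u := (List.pairwise_cons.mp hvs).1
    have hvs' : vs'.Pairwise (· > ·) := (List.pairwise_cons.mp hvs).2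
    rw [List.flatMap_cons, List.flatMap_cons, List.filter_append]
    by_cases hxv : x.2 = v
    · have hfx : [x].filter (fun p => p.2 == v) = [x] := by simp [hxv]
      have htail : vs'.flatMap (fun u => (xs ++ [x]).filter (fun p => p.2 == u))
          = vs'.flatMap (fun u => xs.filter (fun p => p.2 == u)) := by
        apply List.flatMap_congr
        intro u hu
        have hne : ¬ x.2 = u := by have := hvrel u hu; omega
        rw [List.filter_append]
        simp [hne]
      rw [hfx, htail]
      rw [pv_insertBy_append _ _ (xs.filter (fun p => p.2 == v)) _
        (by intro a ha
            have ha2 : a.2 = v := by simpa using (List.of_mem_filter ha)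
            simp [ha2, hxv])]
      rw [pv_insertBy_front _ _ _
        (by intro b hb
            obtain ⟨u, hu, hbu⟩ := List.mem_flatMap.mp hb
            have hb2 : b.2 = u := by simpa using (List.of_mem_filter hbu)
            have hlt : b.2 < x.2 := by have := hvrel u hu; omega
            simpa using hlt)]
      simp
    · have hfx : [x].filter (fun p => p.2 == v) = [] := by simp [hxv]
      have hx' : x.2 ∈ vs' := by
        cases List.mem_cons.mp hx with
        | inl h => exact absurd h hxv
        | inr h => exact h
      rw [hfx, List.append_nil]
      rw [pv_insertBy_append _ _ (xs.filter (fun p => p.2 == v)) _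
        (by intro a ha
            have ha2 : a.2 = v := by simpa using (List.of_mem_filter ha)
            have : ¬ a.2 < x.2 := by have := hvrel _ hx'; omega
            simpa using this)]
      rw [ih hvs' hx']

-- bucket emission over a strictly descending value list covering all counts IS the stable reverse sort
theorem pv_bucket_sorted (xs : List (String × Int)) (vs : List Int)
    (hvs : vs.Pairwise (· > ·)) (hmem : ∀ p ∈ xs, p.2 ∈ vs) :
    vs.flatMap (fun v => xs.filter (fun p => p.2 == v))
    = PySem.List.sorted xs (fun p => p.2) true := by
  induction xs using List.reverseRecOn with
  | nil => simp [PySem.List.sorted]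
  | append_singleton t x ih =>
    rw [PySem.List.sorted_rev_eq_foldl_insertBy, List.foldl_append, List.foldl_cons,
      List.foldl_nil, ← PySem.List.sorted_rev_eq_foldl_insertBy]
    rw [pv_bucket_insert x vs t hvs (hmem x (by simp))]
    rw [ih (fun p hp => hmem p (by simp [hp]))]

theorem pv_pyRange_desc (n : Int) (hn : 0 < n) :
    PySem.List.pyRange n 0 (-1) = (List.range n.toNat).map (fun k : Nat => n - (k : Int)) := by
  simp only [PySem.List.pyRange]
  rw [if_neg (by omega), if_neg (by omega), if_pos hn]
  have hc : (n - 0 + - -1 - 1) / - -1 = n := by norm_num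
  rw [hc]
  apply List.map_congr_left
  intro k _
  ring

theorem pv_ofList_items {s : List (String × Int)} (h : (s.map Prod.fst).Nodup) :
    (PySem.Dict.ofList s).items = s := by
  have := PySem.Dict.items_foldl_insert_fresh (l := s) (k := Prod.fst) (v := Prod.snd)
    (d := (PySem.Dict.empty : PySem.Dict String Int))
    (by intro a _; rfl) h
  simpa [PySem.Dict.ofList, PySem.Dict.update, PySem.Dict.empty] using this

theorem pv_modify_head (b : String) (cnt W : Int) (tail : List (String × Int))
    (hb : b ∉ tail.map Prod.fst) (d : PySem.Dict String Int)
    (hd : d.items = (b, cnt) :: tail) :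
    (d.modify b 0 (· + W)).items = (b, cnt + W) :: tail := by
  have hget : d.get? b = some cnt := by
    simp [PySem.Dict.get?, hd]
  have hcon : d.contains b = true := by
    rw [PySem.Dict.contains_eq_isSome_get?, hget]; rfl
  rw [PySem.Dict.modify, PySem.Dict.getD, hget]
  rw [PySem.Dict.items_insert, if_pos hcon, hd]
  simp only [List.map_cons, beq_self_eq_true, if_true]
  congr 1
  rw [List.map_congr_left, List.map_id]
  intro q hq
  have hq1 : q.1 ≠ b := by
    intro he; exact hb (he ▸ List.mem_map_of_mem hq)
  simp [hq1]

theorem pv_main (hand : String) : sort_hand_wild hand = sort_hand_wild_alt hand := by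
  have hcount := PySem.Dict.foldl_insert_getD_add_one_eq_counter
    (κ := String) ((hand.toList.map (fun c => String.ofList [c])).filter (fun s => s != "J"))
  simp only [sort_hand_wild, sort_hand_wild_alt, pv_loop, pv_bloop, hcount, pv_wilds,
    PySem.Str.len_eq, zero_add]
  set R := (hand.toList.map (fun c => String.ofList [c])).filter (fun s => s != "J") with hR
  set nJ := ((hand.toList.map (fun c => String.ofList [c])).filter (fun s => s == "J")).length with hN
  have hRlen : R.length ≤ hand.toList.length := by
    rw [hR]
    simpa using List.length_filter_le (fun s => s != "J") (hand.toList.map (fun c => String.ofList [c]))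
  by_cases h0 : R = []
  · rw [h0]
    rfl
  · have hitems : (PySem.Dict.counter R).items
        = (PySem.Set.ofList R).map (fun k => (k, (R.count k : Int))) := PySem.Dict.items_counter R
    have hSne : PySem.Set.ofList R ≠ [] := by
      cases hRc : R with
      | nil => exact absurd hRc h0
      | cons a t =>
        have haR : a ∈ R := by rw [hRc]; exact List.mem_cons_self
        have ha : a ∈ PySem.Set.ofList R := (PySem.Set.mem_ofList _ _).mpr haR
        intro hS
        rw [← hRc] at hS
        rw [hS] at ha
        exact List.not_mem_nil ha
    have hlenne : ¬ (PySem.Dict.counter R).items.length = 0 := by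
      rw [hitems]
      simpa using hSne
    rw [if_neg hlenne, if_neg hlenne]
    by_cases hw : (nJ : Int) = 0
    · rw [if_neg (by omega), if_pos hw]
    · rw [if_pos (by omega), if_neg hw]
      have hn : (0 : Int) < (hand.toList.length : Int) := by
        have : 0 < R.length := List.length_pos_of_ne_nil h0
        omega
      have hnd : ((PySem.Dict.counter R).items.map Prod.fst).Nodup := by
        have h := PySem.Dict.nodup_keys_counter (xs := R)
        simpa [PySem.Dict.keys] using h
      have hmem : ∀ p ∈ (PySem.Dict.counter R).items,
          p.2 ∈ PySem.List.pyRange (hand.toList.length : Int) 0 (-1) := by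
        intro p hp
        rw [hitems] at hp
        obtain ⟨k, hk, rfl⟩ := List.mem_map.mp hp
        have hkR : k ∈ R := (PySem.Set.mem_ofList _ _).mp hk
        have h1 : 0 < R.count k := List.count_pos_iff.mpr hkR
        have h2 : R.count k ≤ R.length := List.count_le_length
        rw [pv_pyRange_desc _ hn]
        refine List.mem_map.mpr ⟨((hand.toList.length : Int) - (R.count k : Int)).toNat, ?_, ?_⟩
        · exact List.mem_range.mpr (by omega)
        · show (hand.toList.length : Int) - _ = ((R.count k : Nat) : Int)
          omega
      have hvs : (PySem.List.pyRange (hand.toList.length : Int) 0 (-1)).Pairwise (· > ·) := by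
        rw [pv_pyRange_desc _ hn, List.pairwise_map]
        exact List.pairwise_lt_range.imp (fun h => by omega)
      have hcoll : ∀ v : Int,
          (((PySem.Dict.counter R).items.filter (fun p => p.2 == v)).map (·.1)).map (fun k => (k, v))
          = (PySem.Dict.counter R).items.filter (fun p => p.2 == v) := by
        intro v
        rw [List.map_map]
        conv_rhs => rw [← List.map_id ((PySem.Dict.counter R).items.filter (fun p => p.2 == v))]
        apply List.map_congr_left
        intro p hp
        have hpv : p.2 = v := by simpa using List.of_mem_filter hp
        show (p.1, v) = p
        rw [← hpv]
      simp only [pv_bucket_getD, hcoll]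
      rw [pv_bucket_sorted (PySem.Dict.counter R).items _ hvs hmem]
      have hIne : (PySem.Dict.counter R).items ≠ [] := by
        rw [hitems]
        simpa using hSne
      have hsne : PySem.List.sorted (PySem.Dict.counter R).items (fun it => it.2) true ≠ [] := by
        rw [ne_eq, PySem.List.sorted_eq_nil_iff]
        exact hIne
      obtain ⟨p, tail, hs⟩ := List.exists_cons_of_ne_nil hsne
      obtain ⟨b, cnt⟩ := p
      have hperm : ((PySem.List.sorted (PySem.Dict.counter R).items (fun it => it.2) true).map Prod.fst).Perm ((PySem.Dict.counter R).items.map Prod.fst) :=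
        (PySem.List.sorted_perm (PySem.Dict.counter R).items (fun it => it.2) true).map Prod.fst
      have hnds : ((PySem.List.sorted (PySem.Dict.counter R).items (fun it => it.2) true).map Prod.fst).Nodup :=
        (hperm.nodup_iff).mpr hnd
      have hndcons : (((b, cnt) :: tail).map Prod.fst).Nodup := hs ▸ hnds
      have hbnotin : b ∉ tail.map Prod.fst := by
        simp only [List.map_cons, List.nodup_cons] at hndcons
        exact hndcons.1
      have hm2items : (PySem.Dict.ofList (PySem.List.sorted (PySem.Dict.counter R).items (fun it => it.2) true)).items
          = (b, cnt) :: tail := by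
        rw [pv_ofList_items hnds, hs]
      have hkeys : (PySem.Dict.ofList (PySem.List.sorted (PySem.Dict.counter R).items (fun it => it.2) true)).keys.headD "" = b := by
        rw [PySem.Dict.keys, hm2items]
        rfl
      rw [hs] at hm2items hkeys ⊢
      rw [hkeys]
      rw [pv_modify_head b cnt ((nJ : Nat) : Int) tail hbnotin _ hm2items]

-- ===== VERDICT (by name: the statement is the Claim_ definition above) =====
theorem sort_hand_wild_spec : Claim_equal_sort_hand_wild := by
  intro hand _
  unfold Spec_sort_hand_wild
  exact pv_main hand
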